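-- pv_equiv track=rewrite | github.com/va64doman/codility | Challenges/niobium2019.py | flippingMatrix
-- ===== SOURCE A (Python) =====
-- def flippingMatrix(A):
--     N = len(A)
--     def transform(arr):
--         s1 = ''.join(str(a) for a in arr)
--         s2 = ''.join(str(a^1) for a in arr)
--         return max(s1, s2)
--         pass
--     record = {}
--     for i in range(N):
--         temp = transform(A[i])
--         if temp in record:
--             record[temp] += 1
--         else:
--             record[temp] = 1
--     res = 0
--     for key in record:
--         res = max(res, record[key])
--     return res
--     pass
-- ===== SOURCE B (Python) =====
-- def flippingMatrix(A):
--     def transform(arr):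
--         s1 = ''.join(str(a) for a in arr)
--         s2 = ''.join(str(a ^ 1) for a in arr)
--         return max(s1, s2)
--     keys = sorted(transform(row) for row in A)
--     best = 0
--     run = 0
--     prev = None
--     for k in keys:
--         run = run + 1 if k == prev else 1
--         if run > best:
--             best = run
--         prev = k
--     return best
-- ===== Notes on version B (the rewrite author's own statement) =====
-- stated objective: alternative
-- what changed: replaces dict-based grouping (build a counter, then scan its values for the max) with sort-then-scan: sort the canonical row keys once and walk them in one pass counting the length of each maximal run of equal keys, returning the longest run
import Mathlib
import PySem

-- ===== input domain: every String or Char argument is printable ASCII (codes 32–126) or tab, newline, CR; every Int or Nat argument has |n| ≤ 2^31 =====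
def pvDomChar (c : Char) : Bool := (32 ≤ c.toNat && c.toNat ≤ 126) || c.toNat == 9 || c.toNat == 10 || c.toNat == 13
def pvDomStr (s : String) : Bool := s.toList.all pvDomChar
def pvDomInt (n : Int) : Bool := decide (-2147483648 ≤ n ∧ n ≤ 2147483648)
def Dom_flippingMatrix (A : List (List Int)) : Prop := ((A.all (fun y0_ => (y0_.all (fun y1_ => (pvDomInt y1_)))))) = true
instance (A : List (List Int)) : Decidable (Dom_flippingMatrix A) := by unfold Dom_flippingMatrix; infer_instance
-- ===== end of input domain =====

-- B replaces A's dict-grouping pass and max-over-values pass with sort-then-scan: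
-- sort the canonical row keys and count the longest run of equal keys in one pass.


-- ===== PORT A =====
-- 'a ^ 1' (xor with 1) is ported by hand: it flips the low bit, i.e. a+1 for even a and
-- a-1 for odd a, exact for every Python int (the divisor 2 is positive, where Lean's and
-- Python's '%' agree).
def pvXor1 (a : Int) : Int := if a % 2 = 0 then a + 1 else a - 1

-- A's inner helper 'transform'; B's Python defines the identical helper, so both ports use it.
-- max(s1, s2) on strings is ported as 'if s1 < s2 then s2 else s1' (Lean's String '<' is the
-- same codepoint-lexicographic order Python uses).
def pvTransform (arr : List Int) : String :=
  let s1 := PySem.Str.join "" (arr.map (fun a => PySem.Int.toStr a))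
  let s2 := PySem.Str.join "" (arr.map (fun a => PySem.Int.toStr (pvXor1 a)))
  if s1 < s2 then s2 else s1

def flippingMatrix (A : List (List Int)) : Int :=
  let N : Int := PySem.List.len A
  let record : PySem.Dict String Int :=
    (PySem.List.pyRange 0 N).foldl
      (fun d i =>
        let temp := pvTransform (PySem.List.pyGetD A i [])
        if d.contains temp then d.modify temp 0 (· + 1) else d.insert temp 1)
      PySem.Dict.empty
  record.keys.foldl (fun res key => max res (record.getD key 0)) 0

-- ===== PORT B =====
-- state is (best, run, prev); 'run + 1 if k == prev else 1' then 'if run > best' then 'prev = k'.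
def pvScanStep (s : Int × Int × Option String) (k : String) : Int × Int × Option String :=
  let run := if some k = s.2.2 then s.2.1 + 1 else 1
  let best := if run > s.1 then run else s.1
  (best, run, some k)

def flippingMatrix_alt (A : List (List Int)) : Int :=
  let keys := PySem.List.sorted (A.map pvTransform) (fun k => k) false
  (keys.foldl pvScanStep ((0 : Int), (0 : Int), (none : Option String))).1

-- ===== PRECONDITION & SPEC =====
def Spec_flippingMatrix (A : List (List Int)) (out : Int) : Prop := out = flippingMatrix_alt A
instance (A : List (List Int)) (out : Int) : Decidable (Spec_flippingMatrix A out) := by unfold Spec_flippingMatrix; infer_instance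

-- ===== CLAIM (what is proved, stated in full; the proofs are below) =====
def Claim_equal_flippingMatrix : Prop := ∀ (A : List (List Int)), Dom_flippingMatrix A → Spec_flippingMatrix A (flippingMatrix A)

-- ===== LEMMAS AND PROOFS =====

-- A running max of a projection either stays at its seed or hits some element's value.
theorem pv_fold_max_mem {α : Type} (l : List α) (f : α → Int) :
    ∀ i : Int, l.foldl (fun r x => max r (f x)) i = i ∨
      ∃ x ∈ l, l.foldl (fun r x => max r (f x)) i = f x := by
  induction l with
  | nil => intro i; exact Or.inl rfl
  | cons a t ih =>
    intro i
    rcases ih (max i (f a)) with h | ⟨x, hx, hfx⟩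
    · rcases max_choice i (f a) with hm | hm
      · exact Or.inl (by simpa [List.foldl, hm] using h)
      · exact Or.inr ⟨a, List.mem_cons_self, by simpa [List.foldl, hm] using h⟩
    · exact Or.inr ⟨x, List.mem_cons_of_mem _ hx, by simpa [List.foldl] using hfx⟩

-- The running max of a projection depends only on the SET of elements scanned.
theorem pv_fold_max_congr {α : Type} (l₁ l₂ : List α) (f : α → Int) (i : Int)
    (h : ∀ x, x ∈ l₁ ↔ x ∈ l₂) :
    l₁.foldl (fun r x => max r (f x)) i = l₂.foldl (fun r x => max r (f x)) i := by
  have bound : ∀ (l l' : List α), (∀ x, x ∈ l → x ∈ l') →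
      l.foldl (fun r x => max r (f x)) i ≤ l'.foldl (fun r x => max r (f x)) i := by
    intro l l' hsub
    rcases pv_fold_max_mem l f i with hc | ⟨x, hx, hfx⟩
    · rw [hc]; exact (PySem.List.le_foldl_max_int l' f i).1
    · rw [hfx]; exact (PySem.List.le_foldl_max_int l' f i).2 x (hsub x hx)
  exact le_antisymm (bound l₁ l₂ fun x hx => (h x).1 hx)
    (bound l₂ l₁ fun x hx => (h x).2 hx)

-- The body of A's record loop, as a named function (proof-side only).
def pvStep (d : PySem.Dict String Int) (row : List Int) : PySem.Dict String Int :=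
  let temp := pvTransform row
  if d.contains temp then d.modify temp 0 (· + 1) else d.insert temp 1

-- A's record loop builds exactly the Counter of the row keys.
theorem pv_record_eq (A : List (List Int)) :
    (PySem.List.pyRange 0 (PySem.List.len A)).foldl
      (fun d i =>
        let temp := pvTransform (PySem.List.pyGetD A i [])
        if d.contains temp then d.modify temp 0 (· + 1) else d.insert temp 1)
      PySem.Dict.empty
    = PySem.Dict.counter (A.map pvTransform) := by
  have h2 : List.foldl pvStep PySem.Dict.empty (List.drop (Int.toNat 0) A)
      = PySem.Dict.counter (A.map pvTransform) := by
    simp only [Int.toNat_zero, List.drop_zero]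
    rw [PySem.List.foldl_congr_mem A pvStep
        (fun d row => d.insert (pvTransform row) (d.getD (pvTransform row) 0 + 1))
        PySem.Dict.empty ?_]
    · rw [← List.foldl_map (f := pvTransform)
          (g := fun (d : PySem.Dict String Int) k => d.insert k (d.getD k 0 + 1))]
      exact PySem.Dict.foldl_insert_getD_add_one_eq_counter (A.map pvTransform)
    · intro d row _
      unfold pvStep
      by_cases h : d.contains (pvTransform row)
      · simp only [h, if_true, PySem.Dict.modify]
      · simp only [Bool.not_eq_true] at h
        simp only [h, Bool.false_eq_true, if_false,
          PySem.Dict.getD_of_not_contains d 0 h, zero_add]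
  exact (PySem.List.foldl_pyRange_pyGetD A ([] : List Int) pvStep PySem.Dict.empty
    (a := 0) (by norm_num)).trans h2

-- A computes the maximum multiplicity among the row keys.
theorem pv_A_char (A : List (List Int)) :
    flippingMatrix A =
      (A.map pvTransform).foldl
        (fun r k => max r ((List.count k (A.map pvTransform) : Nat) : Int)) 0 := by
  show ((PySem.List.pyRange 0 (PySem.List.len A)).foldl _ PySem.Dict.empty).keys.foldl _ 0 = _
  rw [pv_record_eq]
  simp only [PySem.Dict.getD_counter, PySem.Dict.keys_counter]
  refine pv_fold_max_congr _ _ (fun k => ((List.count k (A.map pvTransform) : Nat) : Int)) 0 ?_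
  intro x
  rw [← PySem.List.dedup_eq_ofList]
  exact PySem.List.mem_dedup (A.map pvTransform) x

-- in a ≤-sorted list, every element is ≤ the last one
theorem pv_le_getLast (l : List String) (hs : l.Pairwise (· ≤ ·)) (hne : l ≠ [])
    (x : String) (hx : x ∈ l) : x ≤ l.getLast hne := by
  induction l with
  | nil => exact absurd rfl hne
  | cons a t ih =>
    rcases List.pairwise_cons.mp hs with ⟨ha, ht⟩
    cases t with
    | nil =>
      simp only [List.mem_singleton] at hx
      subst hx; simp [List.getLast]
    | cons b u =>
      rw [List.getLast_cons (by simp)]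
      rcases List.mem_cons.mp hx with rfl | hx
      · exact ha _ (List.getLast_mem _)
      · exact ih ht (by simp) hx

-- if-then-else as max (B's 'if run > best' update)
theorem pv_if_gt_eq_max (a b : Int) : (if b > a then b else a) = max a b := by
  split_ifs with h <;> omega

-- INVARIANT of B's scan over a sorted list: best is the maximum multiplicity,
-- run is the multiplicity of the last element, prev is the last element.
theorem pv_scan_inv (l : List String) (hs : l.Pairwise (· ≤ ·)) (hne : l ≠ []) :
    ∃ B : Int,
      l.foldl pvScanStep (0, 0, none) =
        (B, ((List.count (l.getLast hne) l : Nat) : Int), some (l.getLast hne)) ∧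
      (∀ x ∈ l, ((List.count x l : Nat) : Int) ≤ B) ∧
      (∃ x ∈ l, B = ((List.count x l : Nat) : Int)) := by
  induction l using List.reverseRecOn with
  | nil => exact absurd rfl hne
  | append_singleton l k ih =>
    simp only [List.getLast_concat]
    have hsl : l.Pairwise (· ≤ ·) := (List.pairwise_append.mp hs).1
    have hle : ∀ x ∈ l, x ≤ k := fun x hx =>
      (List.pairwise_append.mp hs).2.2 x hx k (by simp)
    have hcnt : ∀ x : String, List.count x (l ++ [k]) =
        List.count x l + (if x = k then 1 else 0) := by
      intro x
      by_cases h : x = k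
      · simp [List.count_append, h]
      · simp [List.count_append, h, Ne.symm h]
    rcases eq_or_ne l [] with rfl | hlne
    · refine ⟨1, by simp [pvScanStep], ?_, ⟨k, by simp, by simp⟩⟩
      intro x hx; simp at hx; subst hx; simp
    · rcases ih hsl hlne with ⟨B, hfold, hbd, x₀, hx₀, hB⟩
      by_cases hk : k = l.getLast hlne
      · -- k equals the previous run's element: run grows by one
        rw [← hk] at hfold
        have hckk : List.count k (l ++ [k]) = List.count k l + 1 := by
          rw [hcnt]; simp
        refine ⟨max B (((List.count k l : Nat) : Int) + 1), ?_, ?_, ?_⟩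
        · rw [List.foldl_append, hfold]
          simp only [List.foldl, pvScanStep, hckk, pv_if_gt_eq_max]
          push_cast
          rfl
        · intro x hx
          rw [hcnt]
          by_cases hxk : x = k
          · subst hxk; rw [if_pos rfl]; push_cast
            exact le_max_of_le_right (by omega)
          · rw [if_neg hxk]; push_cast
            have hxl : x ∈ l := by
              rcases List.mem_append.mp hx with h | h
              · exact h
              · simp at h; exact absurd h hxk
            exact le_max_of_le_left (by exact_mod_cast hbd x hxl)
        · rcases max_cases B (((List.count k l : Nat) : Int) + 1) with ⟨hm, _⟩ | ⟨hm, hgt⟩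
          · by_cases hxk : x₀ = k
            · -- then B = count k l and the right arm exceeds it: contradiction forces equality
              refine ⟨k, by simp, ?_⟩
              rw [hxk] at hB
              rw [hm, hcnt, if_pos rfl]
              push_cast at hB ⊢
              omega
            · refine ⟨x₀, List.mem_append_left _ hx₀, ?_⟩
              rw [hm, hcnt, if_neg hxk]; simpa using hB
          · refine ⟨k, by simp, ?_⟩
            rw [hm, hcnt, if_pos rfl]; push_cast; ring
      · -- new, strictly larger key: a fresh run of length 1
        have hknotin : k ∉ l := fun hkl =>
          hk (le_antisymm (pv_le_getLast l hsl hlne k hkl) (hle _ (List.getLast_mem hlne)))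
        have hcntk : List.count k (l ++ [k]) = 1 := by
          rw [hcnt]; simp [List.count_eq_zero.mpr hknotin]
        have hB1 : (1 : Int) ≤ B := by
          have hc : 0 < List.count (l.getLast hlne) l :=
            List.count_pos_iff.mpr (List.getLast_mem hlne)
          have hb := hbd _ (List.getLast_mem hlne)
          omega
        refine ⟨B, ?_, ?_, ?_⟩
        · rw [List.foldl_append, hfold]
          simp only [List.foldl, pvScanStep]
          rw [if_neg (show ¬ (some k = some (l.getLast hlne)) by simpa using hk), hcntk]
          rw [if_neg (show ¬ ((1 : Int) > B) by omega)]
          push_cast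
          rfl
        · intro x hx
          by_cases hxk : x = k
          · subst hxk; rw [hcntk]; exact_mod_cast hB1
          · have hxl : x ∈ l := by
              rcases List.mem_append.mp hx with h | h
              · exact h
              · simp at h; exact absurd h hxk
            rw [hcnt, if_neg hxk]; push_cast
            exact_mod_cast hbd x hxl
        · have hx₀k : x₀ ≠ k := fun h => hknotin (h ▸ hx₀)
          refine ⟨x₀, List.mem_append_left _ hx₀, ?_⟩
          rw [hcnt, if_neg hx₀k]; simpa using hB

-- B computes the maximum multiplicity among the sorted keys.
theorem pv_B_char (ks : List String) :
    ((PySem.List.sorted ks (fun k => k) false).foldl pvScanStep (0, 0, none)).1 =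
      (PySem.List.sorted ks (fun k => k) false).foldl
        (fun r k => max r ((List.count k (PySem.List.sorted ks (fun k => k) false) : Nat) : Int)) 0 := by
  set l := PySem.List.sorted ks (fun k => k) false with hl
  have hs : l.Pairwise (· ≤ ·) := by
    simpa using PySem.List.sorted_pairwise ks (fun k => k)
  rcases eq_or_ne l [] with hnil | hne
  · simp [hnil]
  · rcases pv_scan_inv l hs hne with ⟨B, hfold, hbd, x₀, hx₀, hB⟩
    rw [hfold]
    refine le_antisymm ?_ ?_
    · rw [hB]
      exact (PySem.List.le_foldl_max_int l
        (fun k => ((List.count k l : Nat) : Int)) 0).2 x₀ hx₀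
    · rcases pv_fold_max_mem l (fun k => ((List.count k l : Nat) : Int)) 0 with hc | ⟨x, hx, hfx⟩
      · rw [hc]; rw [hB]; positivity
      · rw [hfx]; exact hbd x hx

-- ===== VERDICT (by name: the statement is the Claim_ definition above) =====
theorem flippingMatrix_spec : Claim_equal_flippingMatrix := by
  intro A _
  show flippingMatrix A = flippingMatrix_alt A
  rw [pv_A_char]
  show _ = ((PySem.List.sorted (A.map pvTransform) (fun k => k) false).foldl pvScanStep (0, 0, none)).1
  rw [pv_B_char]
  have hperm : (PySem.List.sorted (A.map pvTransform) (fun k => k) false).Perm (A.map pvTransform) :=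
    PySem.List.sorted_perm ..
  have hcnt : ∀ k, List.count k (PySem.List.sorted (A.map pvTransform) (fun k => k) false)
      = List.count k (A.map pvTransform) := fun k => hperm.count_eq k
  calc (A.map pvTransform).foldl
        (fun r k => max r ((List.count k (A.map pvTransform) : Nat) : Int)) 0
      = (PySem.List.sorted (A.map pvTransform) (fun k => k) false).foldl
        (fun r k => max r ((List.count k (A.map pvTransform) : Nat) : Int)) 0 := by
        refine pv_fold_max_congr _ _ _ 0 fun x => ?_
        exact ⟨fun h => (hperm.mem_iff).mpr h, fun h => (hperm.mem_iff).mp h⟩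
    _ = _ := by
        have hf : (fun (r : Int) (k : String) =>
              max r ((List.count k (A.map pvTransform) : Nat) : Int))
            = fun (r : Int) (k : String) =>
              max r ((List.count k (PySem.List.sorted (A.map pvTransform) (fun k => k) false) : Nat) : Int) := by
          funext r k; rw [hcnt k]
        rw [hf]
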